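-- pv_equiv track=rewrite | github.com/Rixmerz/context-first-arch | src/core/context_optimizer.py | compress_whitespace
-- ===== SOURCE A (Python) =====
-- def compress_whitespace(content: str) -> str:
--     """
--     Compress excessive whitespace.
--
--     - Remove blank lines (keep max 1 consecutive blank line)
--     - Remove trailing whitespace
--     - Normalize indentation
--     """
--     # Remove trailing whitespace
--     lines = [line.rstrip() for line in content.split("\n")]
--
--     # Compress consecutive blank lines
--     compressed = []
--     prev_blank = False
--
--     for line in lines:
--         is_blank = not line.strip()
--
--         if is_blank:
--             if not prev_blank:
--                 compressed.append(line)
--             prev_blank = True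
--         else:
--             compressed.append(line)
--             prev_blank = False
--
--     return "\n".join(compressed)
-- ===== SOURCE B (Python) =====
-- def compress_whitespace(content: str) -> str:
--     lines = [line.rstrip() for line in content.split("\n")]
--     # pair each line with its predecessor; keep a blank line only after a non-blank one
--     prevs = [None] + lines[:-1]
--     kept = [line for prev, line in zip(prevs, lines)
--             if line or prev is None or prev]
--     return "\n".join(kept)
-- ===== Notes on version B (the rewrite author's own statement) =====
-- stated objective: idiomatic
-- what changed: Replaced the stateful prev_blank flag loop with a stateless zip-with-predecessor comprehension: each rstripped line is paired with the line before it and kept iff it is non-blank, first, or preceded by a non-blank line.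
import Mathlib
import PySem

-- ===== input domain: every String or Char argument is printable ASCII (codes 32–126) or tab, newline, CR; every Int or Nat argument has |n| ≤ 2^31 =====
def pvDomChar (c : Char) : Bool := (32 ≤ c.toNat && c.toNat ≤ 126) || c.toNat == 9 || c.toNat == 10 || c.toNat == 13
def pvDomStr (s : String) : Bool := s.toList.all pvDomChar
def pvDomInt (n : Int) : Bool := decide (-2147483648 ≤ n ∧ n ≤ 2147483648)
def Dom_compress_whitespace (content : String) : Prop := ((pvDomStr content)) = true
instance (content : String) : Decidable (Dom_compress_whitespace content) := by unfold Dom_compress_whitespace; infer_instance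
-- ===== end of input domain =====

-- B replaces A's stateful prev_blank flag with a stateless zip-with-predecessor comprehension (idiomatic, same cost).

-- ===== PORT A =====
-- the body of A's for-loop, acting on the state (compressed, prev_blank)
def cwStep (st : List String × Bool) (line : String) : List String × Bool :=
  let is_blank := PySem.Str.strip line == ""   -- not line.strip()
  if is_blank then
    (if !st.2 then st.1 ++ [line] else st.1, true)
  else
    (st.1 ++ [line], false)

def compress_whitespace (content : String) : String :=
  -- lines = [line.rstrip() for line in content.split("\n")]; split? is some since "\n" ≠ ""
  let lines := ((PySem.Str.split? content "\n").getD []).map PySem.Str.rstrip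
  let r := lines.foldl cwStep ([], false)
  PySem.Str.join "\n" r.1

-- ===== PORT B =====
def compress_whitespace_alt (content : String) : String :=
  let lines := ((PySem.Str.split? content "\n").getD []).map PySem.Str.rstrip
  let prevs : List (Option String) := none :: lines.dropLast.map some   -- [None] + lines[:-1]
  let kept := ((prevs.zip lines).filter
      (fun pl => pl.2 != "" || pl.1 == none || pl.1 != some "")).map (·.2)
  PySem.Str.join "\n" kept

-- ===== PRECONDITION & SPEC =====
def Spec_compress_whitespace (content : String) (out : String) : Prop := out = compress_whitespace_alt content
instance (content : String) (out : String) : Decidable (Spec_compress_whitespace content out) := by unfold Spec_compress_whitespace; infer_instance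

-- ===== CLAIM (what is proved, stated in full; the proofs are below) =====
def Claim_equal_compress_whitespace : Prop := ∀ (content : String), Dom_compress_whitespace content → Spec_compress_whitespace content (compress_whitespace content)

-- ===== LEMMAS AND PROOFS =====

-- reference recursion: compress a list of (already rstripped) lines, pb = previous line blank
def cwGo : Bool → List String → List String
  | _, [] => []
  | pb, l :: ls =>
      if l == "" then (if pb then cwGo true ls else l :: cwGo true ls)
      else l :: cwGo false ls

theorem dropWhile_idem {α : Type} (p : α → Bool) (l : List α) :
    (l.dropWhile p).dropWhile p = l.dropWhile p := by
  induction l with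
  | nil => simp
  | cons c t ih =>
    by_cases h : p c = true
    · simp [h, ih]
    · simp [h]

theorem rstrip_eq_nil_iff (x : List Char) :
    PySem.Chars.rstrip x = [] ↔ ∀ c ∈ x, PySem.Chars.isspace c := by
  simp [PySem.Chars.rstrip, List.dropWhile_eq_nil_iff]

theorem rstrip_idem (x : List Char) :
    PySem.Chars.rstrip (PySem.Chars.rstrip x) = PySem.Chars.rstrip x := by
  simp [PySem.Chars.rstrip, dropWhile_idem]

theorem all_isspace_dropWhile (x : List Char)
    (h : ∀ c ∈ x.dropWhile PySem.Chars.isspace, PySem.Chars.isspace c) :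
    ∀ c ∈ x, PySem.Chars.isspace c := by
  induction x with
  | nil => simp
  | cons c t ih =>
    by_cases hc : PySem.Chars.isspace c = true
    · intro d hd
      rw [List.mem_cons] at hd
      rcases hd with rfl | hd
      · exact hc
      · exact ih (by simpa [List.dropWhile_cons, hc] using h) d hd
    · intro d hd
      exact h d (by simpa [List.dropWhile_cons, hc] using hd)

theorem strip_eq_nil_iff (x : List Char) :
    PySem.Chars.strip x = [] ↔ ∀ c ∈ x, PySem.Chars.isspace c := by
  constructor
  · intro h
    have h1 : ∀ c ∈ PySem.Chars.lstrip x, PySem.Chars.isspace c :=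
      (rstrip_eq_nil_iff _).mp h
    exact all_isspace_dropWhile x h1
  · intro h
    have : ∀ c ∈ PySem.Chars.lstrip x, PySem.Chars.isspace c := by
      intro c hc
      exact h c (List.dropWhile_sublist _ |>.mem hc)
    exact (rstrip_eq_nil_iff _).mpr this

theorem strip_rstrip_beq (s : String) :
    (PySem.Str.strip (PySem.Str.rstrip s) == "") = (PySem.Str.rstrip s == "") := by
  have key : PySem.Str.strip (PySem.Str.rstrip s) = "" ↔ PySem.Str.rstrip s = "" := by
    constructor
    · intro h
      have h1 : PySem.Chars.strip (PySem.Chars.rstrip s.toList) = [] := by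
        have := congrArg String.toList h
        simpa [PySem.Str.toList_strip, PySem.Str.toList_rstrip] using this
      have h2 : ∀ c ∈ PySem.Chars.rstrip s.toList, PySem.Chars.isspace c :=
        (strip_eq_nil_iff _).mp h1
      have h3 : PySem.Chars.rstrip (PySem.Chars.rstrip s.toList) = [] :=
        (rstrip_eq_nil_iff _).mpr h2
      have h4 : PySem.Chars.rstrip s.toList = [] := by
        rwa [rstrip_idem] at h3
      have : (PySem.Str.rstrip s).toList = [] := by
        simpa [PySem.Str.toList_rstrip] using h4
      exact String.ext (by simpa using this)
    · intro h
      rw [h]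
      rfl
  by_cases h : PySem.Str.rstrip s = ""
  · rw [key.mpr h, h]
  · have h2 : ¬ PySem.Str.strip (PySem.Str.rstrip s) = "" := fun hh => h (key.mp hh)
    simp [h, h2]

-- A's fold with explicit accumulator equals cwGo, given each line is blank iff it equals ""
theorem foldA_eq_go (ls : List String) (acc : List String) (pb : Bool)
    (h : ∀ l ∈ ls, (PySem.Str.strip l == "") = (l == "")) :
    (ls.foldl cwStep (acc, pb)).1 = acc ++ cwGo pb ls := by
  induction ls generalizing acc pb with
  | nil => simp [cwGo]
  | cons l ls ih =>
    have hl : (PySem.Str.strip l == "") = (l == "") := h l (by simp)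
    have hrest : ∀ x ∈ ls, (PySem.Str.strip x == "") = (x == "") :=
      fun x hx => h x (by simp [hx])
    by_cases hb : l = ""
    · have hlb : (l == "") = true := beq_iff_eq.mpr hb
      cases pb with
      | false =>
        have hstep : cwStep (acc, false) l = (acc ++ [l], true) := by
          simp [cwStep, hl, hlb]
        rw [List.foldl_cons, hstep, ih _ _ hrest]
        simp [cwGo, hlb, List.append_assoc]
      | true =>
        have hstep : cwStep (acc, true) l = (acc, true) := by
          simp [cwStep, hl, hlb]
        rw [List.foldl_cons, hstep, ih _ _ hrest]
        simp [cwGo, hlb]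
    · have hlb : (l == "") = false := beq_eq_false_iff_ne.mpr hb
      have hstep : cwStep (acc, pb) l = (acc ++ [l], false) := by
        simp [cwStep, hl, hlb]
      rw [List.foldl_cons, hstep, ih _ _ hrest]
      simp [cwGo, hlb, List.append_assoc]

def pBlank : Option String → Bool
  | none => false
  | some s => s == ""

theorem zipB_eq_go (ls : List String) (p : Option String) :
    (((p :: ls.dropLast.map some).zip ls).filter
      (fun pl => pl.2 != "" || pl.1 == none || pl.1 != some "")).map (·.2)
      = cwGo (pBlank p) ls := by
  induction ls generalizing p with
  | nil => simp [cwGo]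
  | cons l ls ih =>
    have hz : (p :: (l :: ls).dropLast.map some).zip (l :: ls)
        = (p, l) :: ((some l :: ls.dropLast.map some).zip ls) := by
      cases ls <;> simp [List.dropLast]
    rw [hz, List.filter_cons]
    by_cases hb : l = ""
    · subst hb
      cases p with
      | none =>
        rw [if_pos (by decide), List.map_cons, ih (some "")]
        simp [cwGo, pBlank]
      | some s =>
        by_cases hs : s = ""
        · subst hs
          rw [if_neg (by decide), ih (some "")]
          simp [cwGo, pBlank]
        · have hc : ((("" : String) != "") || ((some s : Option String) == none)
              || ((some s : Option String) != some "")) = true := by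
            simp [hs]
          rw [if_pos hc, List.map_cons, ih (some "")]
          simp [cwGo, pBlank, hs]
    · have hc : ((l != "") || ((p : Option String) == none)
          || ((p : Option String) != some "")) = true := by
        simp [hb]
      have hlb : (l == "") = false := beq_eq_false_iff_ne.mpr hb
      rw [if_pos hc, List.map_cons, ih (some l)]
      simp [cwGo, pBlank, hlb]

-- ===== VERDICT (by name: the statement is the Claim_ definition above) =====
theorem compress_whitespace_spec : Claim_equal_compress_whitespace := by
  intro content _
  unfold Spec_compress_whitespace compress_whitespace compress_whitespace_alt
  simp only []
  set lines := ((PySem.Str.split? content "\n").getD []).map PySem.Str.rstrip with hlines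
  have h : ∀ l ∈ lines, (PySem.Str.strip l == "") = (l == "") := by
    intro l hl
    rw [hlines] at hl
    rcases List.mem_map.mp hl with ⟨s, _, rfl⟩
    exact strip_rstrip_beq s
  rw [foldA_eq_go lines [] false h, zipB_eq_go lines none]
  rfl
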